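-- pv_equiv track=rewrite | github.com/DarthPumpkin/github-search | parse.py | collapse_type
-- ===== SOURCE A (Python) =====
-- def collapse_type(input_type):
--     collapsed_type = input_type
--     if input_type == "int":
--         collapsed_type = "Integer"
--     elif input_type.lower() == "long":
--         collapsed_type = "Integer"
--     elif input_type.lower() == "short":
--         collapsed_type = "Integer"
--     elif input_type.lower() == "double":
--         collapsed_type = "Float"
--     elif input_type == "float":
--         collapsed_type = "Float"
--     elif input_type == "String":
--         collapsed_type = "CharSequence"
--     elif input_type == "char[]":
--         collapsed_type = "CharSequence"
--     elif input_type == "Segment":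
--         collapsed_type = "CharSequence"
--     elif input_type.endswith("[]"):
--         type_param = collapse_type(input_type[:-2])
--         collapsed_type = f"List<{type_param}>"
--     # will fail for things like ArrayListWrqpper
--     elif input_type.startswith("ArrayList"):
--         collapsed_type = input_type[5:]
--     return collapsed_type
-- ===== SOURCE B (Python) =====
-- def _is_named(s):
--     return s in ("int", "float", "String", "char[]", "Segment") \
--         or s.lower() in ("long", "short", "double")
--
--
-- def _base(s):
--     if s == "int" or s.lower() in ("long", "short"):
--         return "Integer"
--     if s == "float" or s.lower() == "double":
--         return "Float"
--     if s in ("String", "char[]", "Segment"):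
--         return "CharSequence"
--     if s.startswith("ArrayList"):
--         return s[5:]
--     return s
--
--
-- def collapse_type(input_type):
--     cur = input_type
--     depth = 0
--     while not _is_named(cur) and cur.endswith("[]"):
--         cur = cur[:-2]
--         depth += 1
--     out = _base(cur)
--     for _ in range(depth):
--         out = f"List<{out}>"
--     return out
-- ===== Notes on version B (the rewrite author's own statement) =====
-- stated objective: alternative
-- what changed: Replaced the self-recursive array-suffix stripping with an explicit iterative loop that maintains the current string and a depth counter, then applies a flat base-name mapping once and applies the list wrapper depth times.
import Mathlib
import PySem

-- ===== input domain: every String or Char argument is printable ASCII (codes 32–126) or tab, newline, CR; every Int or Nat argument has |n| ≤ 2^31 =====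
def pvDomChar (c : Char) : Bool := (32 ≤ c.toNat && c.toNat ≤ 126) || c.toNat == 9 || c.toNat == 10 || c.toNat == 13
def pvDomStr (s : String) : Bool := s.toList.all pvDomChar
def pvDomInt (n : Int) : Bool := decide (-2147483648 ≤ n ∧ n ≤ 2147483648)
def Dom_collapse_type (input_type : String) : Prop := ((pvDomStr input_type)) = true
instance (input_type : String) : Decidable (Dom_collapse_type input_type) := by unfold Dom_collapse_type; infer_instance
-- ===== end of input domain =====

-- B rewrites A's recursion as an iterative array-suffix-stripping loop with a depth counter, a flat base mapping, and depth-times wrapping (objective: alternative decomposition, same cost).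

-- termination helper used by both ports (s[:-2] is strictly shorter when s ends with "[]")
theorem pvStrip_lt (s : List Char) (h : PySem.Chars.endswith s "[]".toList = true) :
    (PySem.Chars.slice s none (some (-2))).length < s.length := by
  have h2 : 2 ≤ s.length := by
    have := (PySem.Chars.endswith_iff s "[]".toList).mp h
    simpa using this.length_le
  rw [PySem.Chars.slice_eq_listSlice, PySem.List.slice_to_neg_ofNat s 2 (by omega)]
  simp [List.length_take]
  omega

-- ===== PORT A =====
def collapse_type_core (s : List Char) : List Char :=
  if s = "int".toList then "Integer".toList
  else if PySem.Chars.lower s = "long".toList then "Integer".toList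
  else if PySem.Chars.lower s = "short".toList then "Integer".toList
  else if PySem.Chars.lower s = "double".toList then "Float".toList
  else if s = "float".toList then "Float".toList
  else if s = "String".toList then "CharSequence".toList
  else if s = "char[]".toList then "CharSequence".toList
  else if s = "Segment".toList then "CharSequence".toList
  else if h : PySem.Chars.endswith s "[]".toList then
    "List<".toList ++ collapse_type_core (PySem.Chars.slice s none (some (-2))) ++ ">".toList
  else if PySem.Chars.startswith s "ArrayList".toList then PySem.Chars.slice s (some 5) none
  else s
termination_by s.length
decreasing_by exact pvStrip_lt s h

def collapse_type (input_type : String) : String :=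
  String.mk (collapse_type_core input_type.toList)

-- ===== PORT B =====
def pvIsNamed (s : List Char) : Bool :=
  s == "int".toList || s == "float".toList || s == "String".toList ||
  s == "char[]".toList || s == "Segment".toList ||
  PySem.Chars.lower s == "long".toList || PySem.Chars.lower s == "short".toList ||
  PySem.Chars.lower s == "double".toList

def pvBase (s : List Char) : List Char :=
  if s == "int".toList || PySem.Chars.lower s == "long".toList || PySem.Chars.lower s == "short".toList then
    "Integer".toList
  else if s == "float".toList || PySem.Chars.lower s == "double".toList then "Float".toList
  else if s == "String".toList || s == "char[]".toList || s == "Segment".toList then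
    "CharSequence".toList
  else if PySem.Chars.startswith s "ArrayList".toList then PySem.Chars.slice s (some 5) none
  else s

def pvLoop (s : List Char) (depth : Nat) : List Char × Nat :=
  if h : (!pvIsNamed s && PySem.Chars.endswith s "[]".toList) = true then
    pvLoop (PySem.Chars.slice s none (some (-2))) (depth + 1)
  else (s, depth)
termination_by s.length
decreasing_by exact pvStrip_lt s (Bool.and_eq_true_iff.mp h).2

def pvWrap : Nat → List Char → List Char
  | 0, t => t
  | n + 1, t => pvWrap n ("List<".toList ++ t ++ ">".toList)

def collapse_type_alt (input_type : String) : String :=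
  String.mk (pvWrap (pvLoop input_type.toList 0).2 (pvBase (pvLoop input_type.toList 0).1))

-- ===== PRECONDITION & SPEC =====
def Spec_collapse_type (input_type : String) (out : String) : Prop := out = collapse_type_alt input_type
instance (input_type : String) (out : String) : Decidable (Spec_collapse_type input_type out) := by unfold Spec_collapse_type; infer_instance

-- ===== CLAIM (what is proved, stated in full; the proofs are below) =====
def Claim_equal_collapse_type : Prop := ∀ (input_type : String), Dom_collapse_type input_type → Spec_collapse_type input_type (collapse_type input_type)

-- ===== LEMMAS AND PROOFS =====

-- when the loop halts (named case or no trailing "[]"), B's flat base map is exactly A's value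
set_option maxHeartbeats 2000000 in
theorem pvBase_eq_core (s : List Char)
    (h : pvIsNamed s = true ∨ PySem.Chars.endswith s "[]".toList = false) :
    pvBase s = collapse_type_core s := by
  rw [collapse_type_core, pvBase]
  simp only [pvIsNamed, Bool.or_eq_true, beq_iff_eq] at h ⊢
  split_ifs <;> simp_all

-- when the loop continues, A's recursion takes exactly one "List<...>" step
theorem core_step (s : List Char) (h1 : pvIsNamed s = false)
    (h2 : PySem.Chars.endswith s "[]".toList = true) :
    collapse_type_core s =
      "List<".toList ++ collapse_type_core (PySem.Chars.slice s none (some (-2))) ++ ">".toList := by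
  rw [collapse_type_core]
  simp only [pvIsNamed, Bool.or_eq_false_iff, beq_eq_false_iff_ne, ne_eq] at h1
  simp_all

theorem pvLoop_wrap (n : Nat) : ∀ (s : List Char), s.length ≤ n → ∀ (d : Nat),
    pvWrap (pvLoop s d).2 (pvBase (pvLoop s d).1) = pvWrap d (collapse_type_core s) := by
  induction n with
  | zero =>
    intro s hs d
    have hnil : s = [] := List.length_eq_zero_iff.mp (Nat.le_zero.mp hs)
    subst hnil
    rw [pvLoop, dif_neg (by decide)]
    exact congrArg (pvWrap d) (pvBase_eq_core [] (Or.inr (by decide)))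
  | succ n ih =>
    intro s hs d
    by_cases hc : (!pvIsNamed s && PySem.Chars.endswith s "[]".toList) = true
    · obtain ⟨hn, he⟩ := Bool.and_eq_true_iff.mp hc
      have hn' : pvIsNamed s = false := by simpa using hn
      rw [pvLoop, dif_pos hc,
        ih _ (by have := pvStrip_lt s he; omega) (d + 1),
        core_step s hn' he]
      rfl
    · rw [pvLoop, dif_neg hc]
      have hc' : (!pvIsNamed s && PySem.Chars.endswith s "[]".toList) = false := by
        simpa using hc
      rcases Bool.and_eq_false_iff.mp hc' with h | h
      · exact congrArg (pvWrap d) (pvBase_eq_core s (Or.inl (by simpa using h)))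
      · exact congrArg (pvWrap d) (pvBase_eq_core s (Or.inr h))

-- ===== VERDICT (by name: the statement is the Claim_ definition above) =====
theorem collapse_type_spec : Claim_equal_collapse_type := by
  intro input_type _
  unfold Spec_collapse_type collapse_type collapse_type_alt
  rw [pvLoop_wrap input_type.toList.length input_type.toList le_rfl 0]
  rfl
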